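-- pv_equiv track=rewrite | github.com/grapheneaffiliate/h4-polytopic-attention | solve_arc_b12.py | solve_8403a5d5
-- ===== SOURCE A (Python) =====
-- def solve_8403a5d5(grid):
--     rows = len(grid)
--     cols = len(grid[0])
--     out = [[0]*cols for _ in range(rows)]
--
--     # Find pixel
--     pc, pval = -1, 0
--     for c in range(cols):
--         if grid[rows-1][c] != 0:
--             pc, pval = c, grid[rows-1][c]
--
--     # Fill stripes at pc, pc+2, pc+4, ...
--     for c in range(pc, cols, 2):
--         for r in range(rows):
--             out[r][c] = pval
--
--     # Fill 5s in gaps: first gap (pc+1) gets 5 at row 0, next gap (pc+3) gets 5 at row rows-1, alternating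
--     gap_idx = 0
--     for c in range(pc+1, cols, 2):
--         if gap_idx % 2 == 0:
--             out[0][c] = 5
--         else:
--             out[rows-1][c] = 5
--         gap_idx += 1
--
--     return out
-- ===== SOURCE B (Python) =====
-- def solve_8403a5d5(grid):
--     rows, cols = len(grid), len(grid[0])
--     bottom = grid[rows - 1]
--     pc, pval = -1, 0
--     for c in range(cols):
--         if bottom[c] != 0:
--             pc, pval = c, bottom[c]
--
--     def column(c):
--         off = c - pc
--         if off >= 0 and off % 2 == 0:
--             return [pval] * rows
--         col = [0] * rows
--         if off >= 0:
--             col[0 if ((off - 1) // 2) % 2 == 0 else rows - 1] = 5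
--         return col
--
--     return [list(row) for row in zip(*[column(c) for c in range(cols)])]
-- ===== Notes on version B (the rewrite author's own statement) =====
-- stated objective: alternative
-- what changed: B builds each column as a complete vector (stripe column, gap column with one 5, or zero column) decided by closed-form offset arithmetic and transposes the column list with zip, instead of A's in-place strided writes into a pre-zeroed row-major grid.
import Mathlib
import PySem

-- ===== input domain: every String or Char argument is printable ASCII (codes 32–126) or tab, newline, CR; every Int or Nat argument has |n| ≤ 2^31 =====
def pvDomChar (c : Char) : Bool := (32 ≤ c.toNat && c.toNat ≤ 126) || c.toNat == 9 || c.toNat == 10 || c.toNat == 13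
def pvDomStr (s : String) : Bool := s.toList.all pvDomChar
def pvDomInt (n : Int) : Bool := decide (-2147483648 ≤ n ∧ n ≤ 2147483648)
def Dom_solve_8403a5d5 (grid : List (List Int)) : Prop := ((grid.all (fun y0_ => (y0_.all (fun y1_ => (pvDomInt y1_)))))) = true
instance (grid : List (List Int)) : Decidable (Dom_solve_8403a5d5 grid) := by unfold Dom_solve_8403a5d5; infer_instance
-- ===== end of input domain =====

-- B rebuilds the output column-by-column (closed-form column vectors + a transpose) instead of
-- A's strided in-place writes into a pre-zeroed row grid; same cost, different decomposition.

-- ===== PORT A =====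
-- out[r][c] = v with Python index semantics (c may be -1 and wrap)
def pvSet2 (out : List (List Int)) (r c v : Int) : List (List Int) :=
  PySem.List.pySetD out r (PySem.List.pySetD (PySem.List.pyGetD out r []) c v)

def solve_8403a5d5 (grid : List (List Int)) : List (List Int) :=
  let rows : Int := grid.length
  let cols : Int := (grid.headD []).length
  let out0 : List (List Int) := List.replicate grid.length (List.replicate (grid.headD []).length (0:Int))
  -- find pixel: last nonzero of the bottom row
  let p : Int × Int := (PySem.List.pyRange 0 cols 1).foldl
    (fun p c =>
      if PySem.List.pyGetD (PySem.List.pyGetD grid (rows - 1) []) c 0 ≠ 0 then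
        (c, PySem.List.pyGetD (PySem.List.pyGetD grid (rows - 1) []) c 0)
      else p) (-1, 0)
  -- stripes at pc, pc+2, …
  let out1 := (PySem.List.pyRange p.1 cols 2).foldl
    (fun out c => (PySem.List.pyRange 0 rows 1).foldl (fun out r => pvSet2 out r c p.2) out) out0
  -- 5s in the gaps, alternating row 0 / row rows-1
  let st := (PySem.List.pyRange (p.1 + 1) cols 2).foldl
    (fun (st : List (List Int) × Int) c =>
      (if PySem.Int.mod st.2 2 = 0 then pvSet2 st.1 0 c 5 else pvSet2 st.1 (rows - 1) c 5, st.2 + 1))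
    (out1, 0)
  st.1

-- ===== PORT B =====
def pvColumn (rows pc pval c : Int) : List Int :=
  let off := c - pc
  if 0 ≤ off ∧ PySem.Int.mod off 2 = 0 then
    List.replicate rows.toNat pval
  else
    let col := List.replicate rows.toNat (0:Int)
    if 0 ≤ off then
      PySem.List.pySetD col
        (if PySem.Int.mod (PySem.Int.floordiv (off - 1) 2) 2 = 0 then 0 else rows - 1) 5
    else col

-- list(map(list, zip(*xss))): truncating transpose
def pvTranspose (xss : List (List Int)) : List (List Int) :=
  if _h : xss = [] ∨ xss.any (fun l => l.isEmpty) then []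
  else (xss.map (fun l => l.headD 0)) :: pvTranspose (xss.map (fun l => l.tail))
termination_by (xss.headD []).length
decreasing_by
  rw [not_or] at _h
  obtain ⟨h1, h2⟩ := _h
  cases xss with
  | nil => exact absurd rfl h1
  | cons x t =>
      simp only [List.headD_cons]
      have hx : x ≠ [] := by
        have := h2
        simp only [List.any_cons] at this
        cases x with
        | nil => simp at this
        | cons a b => simp
      cases x with
      | nil => exact absurd rfl hx
      | cons a b => simp [List.length_cons]

def solve_8403a5d5_alt (grid : List (List Int)) : List (List Int) :=
  let rows : Int := grid.length
  let cols : Int := (grid.headD []).length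
  let bottom := PySem.List.pyGetD grid (rows - 1) []
  let p : Int × Int := (PySem.List.pyRange 0 cols 1).foldl
    (fun p c => if PySem.List.pyGetD bottom c 0 ≠ 0 then (c, PySem.List.pyGetD bottom c 0) else p)
    (-1, 0)
  pvTranspose ((PySem.List.pyRange 0 cols 1).map (fun c => pvColumn rows p.1 p.2 c))

-- ===== PRECONDITION & SPEC =====
-- Pre_ excludes exactly the inputs where the Python A raises IndexError: the empty grid,
-- an empty first row (cols = 0 makes the stripe loop write out[r][-1] into empty rows),
-- and a bottom row shorter than the first row (A reads grid[rows-1][c] for every c < cols).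
def Pre_solve_8403a5d5 (grid : List (List Int)) : Prop :=
  grid ≠ [] ∧ 0 < (grid.headD []).length ∧ (grid.headD []).length ≤ (grid.getLast?.getD []).length
instance (grid : List (List Int)) : Decidable (Pre_solve_8403a5d5 grid) := by
  unfold Pre_solve_8403a5d5; infer_instance

def pvWitness_solve_8403a5d5 : List (List Int) := [[0, 3, 0], [0, 0, 0], [0, 2, 0]]

def Spec_solve_8403a5d5 (grid : List (List Int)) (out : List (List Int)) : Prop := out = solve_8403a5d5_alt grid
instance (grid : List (List Int)) (out : List (List Int)) : Decidable (Spec_solve_8403a5d5 grid out) := by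
  unfold Spec_solve_8403a5d5; infer_instance

-- ===== CLAIM (what is proved, stated in full; the proofs are below) =====
def Claim_equal_solve_8403a5d5 : Prop := ∀ (grid : List (List Int)), Dom_solve_8403a5d5 grid → Pre_solve_8403a5d5 grid → Spec_solve_8403a5d5 grid (solve_8403a5d5 grid)

-- ===== LEMMAS AND PROOFS =====

-- an R×C grid presented as the table of a function (proof-side view of both ports' outputs)
def pvMk (R C : Nat) (f : Nat → Nat → Int) : List (List Int) :=
  (List.range R).map (fun i => (List.range C).map (fun j => f i j))

lemma pvMk_congr {R C : Nat} {f g : Nat → Nat → Int}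
    (h : ∀ i < R, ∀ j < C, f i j = g i j) : pvMk R C f = pvMk R C g := by
  unfold pvMk
  refine List.map_congr_left (fun i hi => ?_)
  refine List.map_congr_left (fun j hj => ?_)
  exact h i (List.mem_range.mp hi) j (List.mem_range.mp hj)

lemma pvMk_zero (R C : Nat) : List.replicate R (List.replicate C (0:Int)) = pvMk R C (fun _ _ => 0) := by
  simp [pvMk, List.map_const']

lemma pvSetD_neg_one {α : Type} (xs : List α) (v : α) (h : xs ≠ []) :
    PySem.List.pySetD xs (-1) v = xs.set (xs.length - 1) v := by
  have hl : 1 ≤ xs.length := List.length_pos_iff.mpr h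
  unfold PySem.List.pySetD PySem.List.pySet?
  simp only [PySem.List.pyIdx?]
  rw [if_neg (by norm_num), if_pos (by omega)]
  simp

lemma pvSet2_mk (R C : Nat) (f : Nat → Nat → Int) (r c v : Int)
    (hr0 : 0 ≤ r) (hrR : r < (R:Int))
    (hc : (0 ≤ c ∧ c < (C:Int)) ∨ (c = -1 ∧ 1 ≤ C)) :
    pvSet2 (pvMk R C f) r c v
      = pvMk R C (fun i j => if (i:Int) = r ∧ (j:Int) = (if c < 0 then c + (C:Int) else c) then v else f i j) := by
  unfold pvSet2
  simp only [pvMk]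
  rw [PySem.List.pyGetD_eq_getElem _ [] hr0 (by simpa using hrR)]
  simp only [List.getElem_map, List.getElem_range]
  have hrn : r.toNat < R := by omega
  have hri : ((r.toNat : Nat) : Int) = r := Int.toNat_of_nonneg hr0
  rcases hc with ⟨hc0, hcC⟩ | ⟨hceq, hC1⟩
  · rw [PySem.List.pySetD_of_nonneg _ _ hc0, PySem.List.pySetD_of_nonneg _ _ hr0]
    apply List.ext_getElem (by simp)
    intro i h1 h2
    simp only [List.getElem_set, List.getElem_map, List.getElem_range, List.length_set,
      List.length_map, List.length_range] at h1 h2 ⊢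
    by_cases hir : r.toNat = i
    · subst hir
      simp only [if_true]
      apply List.ext_getElem (by simp)
      intro j hj1 hj2
      simp only [List.getElem_set, List.getElem_map, List.getElem_range] at hj1 hj2 ⊢
      rw [if_neg (by omega : ¬ c < 0)]
      by_cases hjc : c.toNat = j
      · rw [if_pos hjc, if_pos (by constructor <;> omega)]
      · rw [if_neg hjc, if_neg (by intro hand; omega)]
    · rw [if_neg hir]
      apply List.ext_getElem (by simp)
      intro j hj1 hj2
      simp only [List.getElem_map, List.getElem_range] at hj1 hj2 ⊢
      rw [if_neg (by intro hand; omega)]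
  · subst hceq
    rw [pvSetD_neg_one _ _ (by simp; omega)]
    rw [PySem.List.pySetD_of_nonneg _ _ hr0]
    apply List.ext_getElem (by simp)
    intro i h1 h2
    simp only [List.getElem_set, List.getElem_map, List.getElem_range, List.length_map,
      List.length_range] at h1 h2 ⊢
    by_cases hir : r.toNat = i
    · subst hir
      simp only [if_true]
      apply List.ext_getElem (by simp)
      intro j hj1 hj2
      simp only [List.getElem_set, List.getElem_map, List.getElem_range, List.length_map,
        List.length_range] at hj1 hj2 ⊢
      rw [if_pos (by norm_num : (-1:Int) < 0)]
      by_cases hjc : C - 1 = j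
      · rw [if_pos hjc, if_pos (by constructor <;> omega)]
      · rw [if_neg hjc, if_neg (by intro hand; omega)]
    · rw [if_neg hir]
      apply List.ext_getElem (by simp)
      intro j hj1 hj2
      simp only [List.getElem_map, List.getElem_range] at hj1 hj2 ⊢
      rw [if_neg (by intro hand; omega)]

lemma pvRange2_nil (a b : Int) (h : b ≤ a) : PySem.List.pyRange a b 2 = [] := by
  rw [PySem.List.pyRange_of_pos a b (by norm_num)]
  rw [if_neg (by omega)]
  simp

lemma pvRange2_cons (a b : Int) (h : a < b) :
    PySem.List.pyRange a b 2 = a :: PySem.List.pyRange (a + 2) b 2 := by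
  rw [PySem.List.pyRange_of_pos a b (by norm_num), PySem.List.pyRange_of_pos (a + 2) b (by norm_num)]
  have hn : (if a < b then ((b - a + 2 - 1) / 2).toNat else 0)
      = (if a + 2 < b then ((b - (a + 2) + 2 - 1) / 2).toNat else 0) + 1 := by
    split_ifs <;> omega
  rw [hn, List.range_succ_eq_map, List.map_cons, List.map_map]
  refine congrArg₂ List.cons (by norm_num) ?_
  refine List.map_congr_left (fun k _ => ?_)
  simp only [Function.comp_apply]
  push_cast
  ring

-- the pixel scan yields pc ≥ -1, and pval = 0 when no pixel was found
lemma pvScan_prop (g : Int → Int) (b : Int) :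
    ∀ (n : Nat) (a : Int) (p0 : Int × Int), 0 ≤ a → -1 ≤ p0.1 → (p0.1 = -1 → p0.2 = 0) →
      (b - a).toNat ≤ n →
      -1 ≤ ((PySem.List.pyRange a b 1).foldl (fun p c => if g c ≠ 0 then (c, g c) else p) p0).1 ∧
      (((PySem.List.pyRange a b 1).foldl (fun p c => if g c ≠ 0 then (c, g c) else p) p0).1 = -1 →
        ((PySem.List.pyRange a b 1).foldl (fun p c => if g c ≠ 0 then (c, g c) else p) p0).2 = 0) := by
  intro n
  induction n with
  | zero =>
      intro a p0 ha h1 h2 hn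
      rw [PySem.List.pyRange_one_eq_nil (by omega)]
      exact ⟨h1, h2⟩
  | succ n ih =>
      intro a p0 ha h1 h2 hn
      by_cases hab : a < b
      · rw [PySem.List.pyRange_one_cons hab]
        simp only [List.foldl_cons]
        refine ih (a + 1) (if g a ≠ 0 then (a, g a) else p0) (by omega) ?_ ?_ (by omega)
        · split_ifs with h
          · simp; omega
          · exact h1
        · split_ifs with h
          · intro hh; simp at hh; omega
          · exact h2
      · rw [PySem.List.pyRange_one_eq_nil (by omega)]
        exact ⟨h1, h2⟩

-- writing one full column (the inner row loop of A's stripe pass)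
lemma pvL_col (R C : Nat) (c v : Int)
    (hc : (0 ≤ c ∧ c < (C:Int)) ∨ (c = -1 ∧ 1 ≤ C)) :
    ∀ (n : Nat) (x : Int) (f : Nat → Nat → Int), 0 ≤ x → ((R:Int) - x).toNat ≤ n →
      (PySem.List.pyRange x (R:Int) 1).foldl (fun out r => pvSet2 out r c v) (pvMk R C f)
      = pvMk R C (fun i j =>
          if x ≤ (i:Int) ∧ (j:Int) = (if c < 0 then c + (C:Int) else c) then v else f i j) := by
  intro n
  induction n with
  | zero =>
      intro x f hx hn
      rw [PySem.List.pyRange_one_eq_nil (by omega)]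
      exact pvMk_congr (fun i hi j hj => (if_neg (fun hand => by have := hand.1; omega)).symm)
  | succ n ih =>
      intro x f hx hn
      by_cases hxR : x < (R:Int)
      · rw [PySem.List.pyRange_one_cons hxR]
        simp only [List.foldl_cons]
        rw [pvSet2_mk R C f x c v hx hxR hc]
        rw [ih (x + 1)
            (fun i j => if (i:Int) = x ∧ (j:Int) = (if c < 0 then c + (C:Int) else c) then v else f i j)
            (by omega) (by omega)]
        apply pvMk_congr
        intro i hi j hj
        rcases hc with ⟨hc0, _⟩ | ⟨hceq, _⟩
        · rw [if_neg (by omega : ¬ c < 0)]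
          split_ifs <;> first | rfl | omega
        · subst hceq
          rw [if_pos (by norm_num : (-1:Int) < 0)]
          split_ifs <;> first | rfl | omega
      · rw [PySem.List.pyRange_one_eq_nil (by omega)]
        exact pvMk_congr (fun i hi j hj => (if_neg (fun hand => by have := hand.1; omega)).symm)

-- A's stripe pass
lemma pvL_stripes (R C : Nat) (v : Int) :
    ∀ (n : Nat) (x : Int) (f : Nat → Nat → Int), 0 ≤ x → ((C:Int) - x).toNat ≤ n →
      (PySem.List.pyRange x (C:Int) 2).foldl
        (fun out c => (PySem.List.pyRange 0 (R:Int) 1).foldl (fun out r => pvSet2 out r c v) out)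
        (pvMk R C f)
      = pvMk R C (fun i j => if x ≤ (j:Int) ∧ ((j:Int) - x) % 2 = 0 then v else f i j) := by
  intro n
  induction n with
  | zero =>
      intro x f hx hn
      rw [pvRange2_nil _ _ (by omega)]
      exact pvMk_congr (fun i hi j hj => (if_neg (fun hand => by have := hand.1; omega)).symm)
  | succ n ih =>
      intro x f hx hn
      by_cases hxC : x < (C:Int)
      · rw [pvRange2_cons _ _ hxC]
        simp only [List.foldl_cons]
        rw [pvL_col R C x v (Or.inl ⟨hx, hxC⟩) R 0 f (by omega) (by omega)]
        rw [ih (x + 2)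
            (fun i j => if 0 ≤ (i:Int) ∧ (j:Int) = (if x < 0 then x + (C:Int) else x) then v else f i j)
            (by omega) (by omega)]
        apply pvMk_congr
        intro i hi j hj
        rw [if_neg (by omega : ¬ x < 0)]
        split_ifs <;> first | rfl | omega
      · rw [pvRange2_nil _ _ (by omega)]
        exact pvMk_congr (fun i hi j hj => (if_neg (fun hand => by have := hand.1; omega)).symm)

-- A's gap pass, with the alternating gap counter carried through
lemma pvL_gaps (R C : Nat) (hR : 1 ≤ R) :
    ∀ (n : Nat) (x g0 : Int) (f : Nat → Nat → Int), 0 ≤ x → 0 ≤ g0 → ((C:Int) - x).toNat ≤ n →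
      ((PySem.List.pyRange x (C:Int) 2).foldl
        (fun (st : List (List Int) × Int) c =>
          (if PySem.Int.mod st.2 2 = 0 then pvSet2 st.1 0 c 5 else pvSet2 st.1 ((R:Int) - 1) c 5, st.2 + 1))
        (pvMk R C f, g0)).1
      = pvMk R C (fun i j =>
          if x ≤ (j:Int) ∧ ((j:Int) - x) % 2 = 0 ∧
             (i:Int) = (if (g0 + ((j:Int) - x) / 2) % 2 = 0 then 0 else (R:Int) - 1) then 5
          else f i j) := by
  intro n
  induction n with
  | zero =>
      intro x g0 f hx hg hn
      rw [pvRange2_nil _ _ (by omega)]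
      exact pvMk_congr (fun i hi j hj => (if_neg (fun hand => by have := hand.1; omega)).symm)
  | succ n ih =>
      intro x g0 f hx hg hn
      by_cases hxC : x < (C:Int)
      · rw [pvRange2_cons _ _ hxC]
        simp only [List.foldl_cons]
        rw [PySem.Int.mod_eq_emod_of_pos (by norm_num : (0:Int) < 2)]
        by_cases hp0 : g0 % 2 = 0
        · rw [if_pos hp0]
          rw [pvSet2_mk R C f 0 x 5 le_rfl (by omega) (Or.inl ⟨hx, hxC⟩)]
          rw [ih (x + 2) (g0 + 1)
              (fun i j => if (i:Int) = 0 ∧ (j:Int) = (if x < 0 then x + (C:Int) else x) then 5 else f i j)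
              (by omega) (by omega) (by omega)]
          apply pvMk_congr
          intro i hi j hj
          rw [if_neg (by omega : ¬ x < 0)]
          rw [show (g0 + 1 + ((j:Int) - (x + 2)) / 2) % 2 = (g0 + ((j:Int) - x) / 2) % 2 from by omega]
          by_cases hq : (g0 + ((j:Int) - x) / 2) % 2 = 0
          · rw [if_pos hq]
            split_ifs <;> first | rfl | omega
          · rw [if_neg hq]
            split_ifs <;> first | rfl | omega
        · rw [if_neg hp0]
          rw [pvSet2_mk R C f ((R:Int) - 1) x 5 (by omega) (by omega) (Or.inl ⟨hx, hxC⟩)]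
          rw [ih (x + 2) (g0 + 1)
              (fun i j => if (i:Int) = (R:Int) - 1 ∧ (j:Int) = (if x < 0 then x + (C:Int) else x) then 5 else f i j)
              (by omega) (by omega) (by omega)]
          apply pvMk_congr
          intro i hi j hj
          rw [if_neg (by omega : ¬ x < 0)]
          rw [show (g0 + 1 + ((j:Int) - (x + 2)) / 2) % 2 = (g0 + ((j:Int) - x) / 2) % 2 from by omega]
          by_cases hq : (g0 + ((j:Int) - x) / 2) % 2 = 0
          · rw [if_pos hq]
            split_ifs <;> first | rfl | omega
          · rw [if_neg hq]
            split_ifs <;> first | rfl | omega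
      · rw [pvRange2_nil _ _ (by omega)]
        exact pvMk_congr (fun i hi j hj => (if_neg (fun hand => by have := hand.1; omega)).symm)

lemma pvHeadD_getD (l : List Int) (d : Int) : l.headD d = l.getD 0 d := by
  cases l <;> simp

lemma pvTail_getD (l : List Int) (i : Nat) (d : Int) : l.tail.getD i d = l.getD (i + 1) d := by
  cases l <;> simp

lemma pvTranspose_spec :
    ∀ (R : Nat) (xss : List (List Int)), xss ≠ [] → (∀ l ∈ xss, l.length = R + 1) →
      pvTranspose xss = (List.range (R + 1)).map (fun i => xss.map (fun l => l.getD i 0)) := by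
  intro R
  induction R with
  | zero =>
      intro xss hne hlen
      have hcond : ¬ (xss = [] ∨ xss.any (fun l => l.isEmpty) = true) := by
        refine not_or.mpr ⟨hne, ?_⟩
        simp only [List.any_eq_true, not_exists]
        rintro l ⟨hl, hemp⟩
        have := hlen l hl
        simp only [List.isEmpty_iff] at hemp
        rw [hemp] at this
        simp at this
      rw [pvTranspose, dif_neg hcond]
      obtain ⟨l0, hl0⟩ := List.exists_mem_of_ne_nil xss hne
      have hcond2 : (xss.map (fun l => l.tail) = [] ∨ (xss.map (fun l => l.tail)).any (fun l => l.isEmpty) = true) := by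
        right
        simp only [List.any_eq_true]
        refine ⟨l0.tail, List.mem_map_of_mem hl0, ?_⟩
        have := hlen l0 hl0
        cases l0 with
        | nil => simp at this
        | cons a t =>
            simp only [List.length_cons] at this
            have ht : t = [] := List.length_eq_zero_iff.mp (by omega)
            simp [ht]
      rw [pvTranspose, dif_pos hcond2]
      simp only [Nat.zero_add, List.range_one, List.map_cons, List.map_nil]
      refine congrArg₂ List.cons ?_ rfl
      exact List.map_congr_left (fun l _ => pvHeadD_getD l 0)
  | succ R ih =>
      intro xss hne hlen
      have hcond : ¬ (xss = [] ∨ xss.any (fun l => l.isEmpty) = true) := by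
        refine not_or.mpr ⟨hne, ?_⟩
        simp only [List.any_eq_true, not_exists]
        rintro l ⟨hl, hemp⟩
        have := hlen l hl
        simp only [List.isEmpty_iff] at hemp
        rw [hemp] at this
        simp at this
      rw [pvTranspose, dif_neg hcond]
      rw [ih (xss.map (fun l => l.tail)) (by simpa using hne)
          (by
            intro l hl
            obtain ⟨l0, hl0, rfl⟩ := List.mem_map.mp hl
            have := hlen l0 hl0
            simp [this])]
      conv_rhs => rw [List.range_succ_eq_map, List.map_cons, List.map_map]
      refine congrArg₂ List.cons ?_ ?_
      · exact List.map_congr_left (fun l _ => pvHeadD_getD l 0)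
      · refine List.map_congr_left (fun i _ => ?_)
        simp only [Function.comp_apply, List.map_map]
        refine List.map_congr_left (fun l _ => ?_)
        simp only [Function.comp_apply]
        exact pvTail_getD l i 0

lemma pvColumn_length (rows pc pval c : Int) : (pvColumn rows pc pval c).length = rows.toNat := by
  simp only [pvColumn]
  split_ifs <;> simp [PySem.List.length_pySetD]

lemma pvColumn_getD (R : Nat) (hR : 1 ≤ R) (pc pval : Int) (j i : Nat) (hi : i < R) :
    (pvColumn (R:Int) pc pval (j:Int)).getD i 0 =
      (if 0 ≤ (j:Int) - pc ∧ ((j:Int) - pc) % 2 = 0 then pval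
       else if 0 ≤ (j:Int) - pc then
         (if (i:Int) = (if (((j:Int) - pc - 1) / 2) % 2 = 0 then (0:Int) else (R:Int) - 1) then 5 else 0)
       else 0) := by
  simp only [pvColumn]
  simp only [PySem.Int.mod_eq_emod_of_pos (show (0:Int) < 2 by norm_num),
    PySem.Int.floordiv_eq_ediv_of_pos (show (0:Int) < 2 by norm_num)]
  by_cases h1 : 0 ≤ (j:Int) - pc ∧ ((j:Int) - pc) % 2 = 0
  · rw [if_pos h1, if_pos h1]
    simp [List.getD_eq_getElem?_getD, hi]
  · rw [if_neg h1, if_neg h1]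
    by_cases h2 : 0 ≤ (j:Int) - pc
    · rw [if_pos h2, if_pos h2]
      set t : Int := if (((j:Int) - pc - 1) / 2) % 2 = 0 then (0:Int) else (R:Int) - 1 with ht
      have ht0 : 0 ≤ t := by rw [ht]; split_ifs <;> omega
      have htR : t.toNat < R := by rw [ht]; split_ifs <;> omega
      rw [PySem.List.pySetD_of_nonneg _ _ ht0]
      rw [List.getD_eq_getElem?_getD, List.getElem?_set]
      by_cases hit : t.toNat = i
      · rw [if_pos hit]
        simp only [List.length_replicate, Int.toNat_natCast]
        rw [if_pos htR]
        simp only [Option.getD_some]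
        rw [if_pos (by omega)]
      · rw [if_neg hit, if_neg (by omega)]
        simp [hi]
    · rw [if_neg h2, if_neg h2]
      simp [List.getD_eq_getElem?_getD, hi]

-- the whole pipeline, with the scan result (pc, pval) abstracted
lemma pvCore (R C : Nat) (hR : 1 ≤ R) (hC : 1 ≤ C) (pc pval : Int)
    (hpc : -1 ≤ pc) (hz : pc = -1 → pval = 0) :
    ((PySem.List.pyRange (pc + 1) (C:Int) 2).foldl
        (fun (st : List (List Int) × Int) c =>
          (if PySem.Int.mod st.2 2 = 0 then pvSet2 st.1 0 c 5 else pvSet2 st.1 ((R:Int) - 1) c 5, st.2 + 1))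
        ((PySem.List.pyRange pc (C:Int) 2).foldl
          (fun out c => (PySem.List.pyRange 0 (R:Int) 1).foldl (fun out r => pvSet2 out r c pval) out)
          (List.replicate R (List.replicate C (0:Int))), 0)).1
    = pvTranspose ((PySem.List.pyRange 0 (C:Int) 1).map (fun c => pvColumn (R:Int) pc pval c)) := by
  rw [pvMk_zero]
  have hA1 : (PySem.List.pyRange pc (C:Int) 2).foldl
      (fun out c => (PySem.List.pyRange 0 (R:Int) 1).foldl (fun out r => pvSet2 out r c pval) out)
      (pvMk R C (fun _ _ => 0))
      = pvMk R C (fun i j => if pc ≤ (j:Int) ∧ ((j:Int) - pc) % 2 = 0 then pval else 0) := by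
    rcases eq_or_lt_of_le hpc with hm1 | hpos
    · -- pc = -1: the first stripe write wraps to the last column, with pval = 0
      have hpv : pval = 0 := hz hm1.symm
      rw [← hm1]
      rw [pvRange2_cons (-1) _ (by omega)]
      simp only [List.foldl_cons]
      rw [pvL_col R C (-1) pval (Or.inr ⟨rfl, hC⟩) R 0 _ le_rfl (by omega)]
      rw [show ((-1:Int) + 2) = 1 from by norm_num]
      rw [pvL_stripes R C pval C 1
          (fun i j => if (0:Int) ≤ (i:Int) ∧ (j:Int) = (if (-1:Int) < 0 then -1 + (C:Int) else -1) then pval else 0)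
          (by omega) (by omega)]
      apply pvMk_congr
      intro i hi j hj
      subst hpv
      split_ifs <;> rfl
    · -- pc ≥ 0
      exact pvL_stripes R C pval C pc _ (by omega) (by omega)
  rw [hA1]
  rw [pvL_gaps R C hR C (pc + 1) 0 _ (by omega) (by norm_num) (by omega)]
  -- B side: transpose of the column table
  have hRR : R - 1 + 1 = R := by omega
  rw [pvTranspose_spec (R - 1)
      ((PySem.List.pyRange 0 (C:Int) 1).map (fun c => pvColumn (R:Int) pc pval c))
      (by
        intro hnil
        have : ((PySem.List.pyRange 0 (C:Int) 1).map (fun c => pvColumn (R:Int) pc pval c)).length = 0 := by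
          rw [hnil]; rfl
        rw [List.length_map, PySem.List.length_pyRange_one] at this
        omega)
      (by
        intro l hl
        obtain ⟨c, _, rfl⟩ := List.mem_map.mp hl
        rw [pvColumn_length]
        omega)]
  rw [hRR]
  rw [PySem.List.pyRange_zero_nat C]
  simp only [pvMk, List.map_map]
  refine List.map_congr_left (fun i hi => ?_)
  rw [List.mem_range] at hi
  refine List.map_congr_left (fun j hj => ?_)
  rw [List.mem_range] at hj
  simp only [Function.comp_apply]
  rw [pvColumn_getD R hR pc pval j i hi]
  rw [show (0 + ((j:Int) - (pc + 1)) / 2) % 2 = (((j:Int) - pc - 1) / 2) % 2 from by omega]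
  by_cases hq : (((j:Int) - pc - 1) / 2) % 2 = 0
  · rw [if_pos hq]
    split_ifs <;> first | rfl | omega
  · rw [if_neg hq]
    split_ifs <;> first | rfl | omega

-- ===== VERDICT (by name: the statement is the Claim_ definition above) =====
theorem solve_8403a5d5_spec : Claim_equal_solve_8403a5d5 := by
  unfold Claim_equal_solve_8403a5d5
  intro grid _ hpre
  obtain ⟨hne, hC1, _⟩ := hpre
  unfold Spec_solve_8403a5d5
  simp only [solve_8403a5d5, solve_8403a5d5_alt]
  have hR1 : 1 ≤ grid.length := List.length_pos_iff.mpr hne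
  have hscan := pvScan_prop
    (fun c => PySem.List.pyGetD (PySem.List.pyGetD grid ((grid.length:Int) - 1) []) c 0)
    ((grid.headD []).length : Int) (grid.headD []).length 0 (-1, 0)
    le_rfl (by norm_num) (fun _ => rfl) (by omega)
  exact pvCore grid.length (grid.headD []).length hR1 hC1 _ _ hscan.1 hscan.2
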